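-- pv_equiv track=rewrite | github.com/badmsconfig/Templates_DPO | main1.py | clean_markdown_content
-- ===== SOURCE A (Python) =====
-- def clean_markdown_content(content):
--     """Очищает содержимое Markdown, убирая лишние пустые строки и объединяя переносы."""
--     lines = content.splitlines()
--     cleaned_lines = []
--     prev_line_empty = False
--
--     for line in lines:
--         line = line.rstrip()
--         if not line:
--             if not prev_line_empty:
--                 cleaned_lines.append("")
--                 prev_line_empty = True
--             continue
--         prev_line_empty = False
--         cleaned_lines.append(line)
--
--     # Удаляем лишние пустые строки в конце
--     while cleaned_lines and not cleaned_lines[-1]: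
--         cleaned_lines.pop()
--
--     # Объединяем строки, которые должны быть вместе (например, текст в абзацах)
--     result = []
--     i = 0
--     while i < len(cleaned_lines):
--         line = cleaned_lines[i]
--         if line.startswith('#') or line.startswith('-') or not line:
--             result.append(line)
--         else:
--             # Объединяем строки абзаца
--             paragraph = [line]
--             j = i + 1
--             while j < len(cleaned_lines) and cleaned_lines[j] and not cleaned_lines[j].startswith(('#', '-')):
--                 paragraph.append(cleaned_lines[j])
--                 j += 1
--             result.append(' '.join(paragraph))
--             i = j - 1
--         i += 1
--
--     return '\n'.join(result)
-- ===== SOURCE B (Python) =====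
-- def clean_markdown_content(content):
--     """Single forward pass with a paragraph buffer instead of A's index-jumping nested while."""
--     cleaned = []
--     prev_empty = False
--     for line in content.splitlines():
--         line = line.rstrip()
--         if line:
--             cleaned.append(line)
--             prev_empty = False
--         elif not prev_empty:
--             cleaned.append("")
--             prev_empty = True
--     while cleaned and not cleaned[-1]:
--         cleaned.pop()
--     result = []
--     buf = []
--     for line in cleaned:
--         if line.startswith('#') or line.startswith('-') or not line:
--             if buf:
--                 result.append(' '.join(buf))
--                 buf = []
--             result.append(line)
--         else:
--             buf.append(line)
--     if buf:
--         result.append(' '.join(buf))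
--     return '\n'.join(result)
-- ===== Notes on version B (the rewrite author's own statement) =====
-- stated objective: simpler
-- what changed: The index-jumping outer while with a nested inner while that scans ahead for each paragraph is replaced by a single forward pass that maintains a paragraph buffer, flushed at blank/#/- boundary lines and at end of input.
import Mathlib
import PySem

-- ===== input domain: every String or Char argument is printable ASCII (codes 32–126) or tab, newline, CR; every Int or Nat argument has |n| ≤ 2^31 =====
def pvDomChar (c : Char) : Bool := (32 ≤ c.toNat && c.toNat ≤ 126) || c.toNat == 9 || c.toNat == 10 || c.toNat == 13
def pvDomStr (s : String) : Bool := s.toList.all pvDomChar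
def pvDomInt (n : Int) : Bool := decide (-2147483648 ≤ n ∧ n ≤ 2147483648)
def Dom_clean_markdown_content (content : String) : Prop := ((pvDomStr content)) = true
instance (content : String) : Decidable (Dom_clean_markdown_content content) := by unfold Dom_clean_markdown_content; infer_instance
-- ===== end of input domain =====

-- B replaces A's index-jumping nested while loop by a single forward pass with a paragraph buffer (objective: simpler).

-- ===== PORT A =====
-- phase 1 loop body: line = line.rstrip(); if not line: if not prev: append ""; continue; prev=False; append line
def pvAStep1 (st : List (List Char) × Bool) (line0 : List Char) : List (List Char) × Bool :=
  let line := PySem.Chars.rstrip line0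
  if line.isEmpty then
    if !st.2 then (st.1 ++ [[]], true) else st
  else (st.1 ++ [line], false)

-- while cleaned_lines and not cleaned_lines[-1]: cleaned_lines.pop()
def pvATrim (cl : List (List Char)) : List (List Char) :=
  match h : cl.getLast? with
  | some l => if l.isEmpty then pvATrim cl.dropLast else cl
  | none => cl
termination_by cl.length
decreasing_by
  have : cl ≠ [] := by intro hnil; rw [hnil] at h; simp at h
  simpa [List.length_dropLast] using Nat.sub_lt (List.length_pos_iff.mpr this) Nat.one_pos

-- inner while: while j < len and cleaned[j] and not cleaned[j].startswith(('#','-')): paragraph.append; j += 1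
def pvAInner (cl : List (List Char)) (j : Nat) (para : List (List Char)) : Nat × List (List Char) :=
  if h : j < cl.length then
    if !(cl[j]).isEmpty && !(PySem.Chars.startswith cl[j] ['#'] || PySem.Chars.startswith cl[j] ['-']) then
      pvAInner cl (j + 1) (para ++ [cl[j]])
    else (j, para)
  else (j, para)
termination_by cl.length - j

-- needed by pvAOuter's termination: the inner while never moves j backwards
theorem pvAInner_ge (cl : List (List Char)) (j : Nat) (para : List (List Char)) :
    j ≤ (pvAInner cl j para).1 := by
  induction hn : cl.length - j using Nat.strong_induction_on generalizing j para with
  | _ n ih =>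
    unfold pvAInner
    split
    · split
      · next h _ =>
        have h1 : cl.length - (j + 1) < n := by omega
        exact Nat.le_trans (Nat.le_succ j) (ih _ h1 (j + 1) _ rfl)
      · exact Nat.le_refl j
    · exact Nat.le_refl j

-- outer while over i; in the paragraph branch A sets i = j - 1 then i += 1, i.e. continues at j
def pvAOuter (cl : List (List Char)) (i : Nat) (acc : List (List Char)) : List (List Char) :=
  if h : i < cl.length then
    if PySem.Chars.startswith cl[i] ['#'] || PySem.Chars.startswith cl[i] ['-'] || (cl[i]).isEmpty then
      pvAOuter cl (i + 1) (acc ++ [cl[i]])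
    else
      pvAOuter cl (pvAInner cl (i + 1) [cl[i]]).1
        (acc ++ [PySem.Chars.join [' '] (pvAInner cl (i + 1) [cl[i]]).2])
  else acc
termination_by cl.length - i
decreasing_by
  · omega
  · have := pvAInner_ge cl (i + 1) [cl[i]]
    omega

def clean_markdown_content (content : String) : String :=
  let lines := (PySem.Str.splitlines content).map String.toList
  let cleaned := (lines.foldl pvAStep1 ([], false)).1
  let trimmed := pvATrim cleaned
  String.mk (PySem.Chars.join [Char.ofNat 10] (pvAOuter trimmed 0 []))

-- ===== PORT B =====
def pvBStep1 (st : List (List Char) × Bool) (line0 : List Char) : List (List Char) × Bool :=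
  let line := PySem.Chars.rstrip line0
  if !line.isEmpty then (st.1 ++ [line], false)
  else if !st.2 then (st.1 ++ [[]], true) else st

def pvBTrim (cl : List (List Char)) : List (List Char) :=
  match h : cl.getLast? with
  | some l => if l.isEmpty then pvBTrim cl.dropLast else cl
  | none => cl
termination_by cl.length
decreasing_by
  have : cl ≠ [] := by intro hnil; rw [hnil] at h; simp at h
  simpa [List.length_dropLast] using Nat.sub_lt (List.length_pos_iff.mpr this) Nat.one_pos

-- if buf: result.append(' '.join(buf))
def pvBFlush (res buf : List (List Char)) : List (List Char) :=
  if !buf.isEmpty then res ++ [PySem.Chars.join [' '] buf] else res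

-- one step of B's single forward pass over the cleaned lines, state = (result, buffer)
def pvBStep2 (st : List (List Char) × List (List Char)) (line : List Char) :
    List (List Char) × List (List Char) :=
  if PySem.Chars.startswith line ['#'] || PySem.Chars.startswith line ['-'] || line.isEmpty then
    (pvBFlush st.1 st.2 ++ [line], [])
  else (st.1, st.2 ++ [line])

def clean_markdown_content_alt (content : String) : String :=
  let lines := (PySem.Str.splitlines content).map String.toList
  let cleaned := (lines.foldl pvBStep1 ([], false)).1
  let trimmed := pvBTrim cleaned
  let st := trimmed.foldl pvBStep2 ([], [])
  String.mk (PySem.Chars.join [Char.ofNat 10] (pvBFlush st.1 st.2))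

-- ===== PRECONDITION & SPEC =====
def Spec_clean_markdown_content (content : String) (out : String) : Prop := out = clean_markdown_content_alt content
instance (content : String) (out : String) : Decidable (Spec_clean_markdown_content content out) := by unfold Spec_clean_markdown_content; infer_instance

-- ===== CLAIM (what is proved, stated in full; the proofs are below) =====
def Claim_equal_clean_markdown_content : Prop := ∀ (content : String), Dom_clean_markdown_content content → Spec_clean_markdown_content content (clean_markdown_content content)

-- ===== LEMMAS AND PROOFS =====

theorem pvStep1_eq : pvAStep1 = pvBStep1 := by
  funext st line0
  unfold pvAStep1 pvBStep1
  by_cases h : (PySem.Chars.rstrip line0).isEmpty <;> simp [h]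

theorem pvTrim_eq (cl : List (List Char)) : pvATrim cl = pvBTrim cl := by
  induction hn : cl.length using Nat.strong_induction_on generalizing cl with
  | _ n ih =>
    unfold pvATrim pvBTrim
    split
    · next l h =>
      split
      · next =>
        have hne : cl ≠ [] := by intro hnil; rw [hnil] at h; simp at h
        have hpos : 0 < cl.length := List.length_pos_iff.mpr hne
        exact ih cl.dropLast.length (by simp only [List.length_dropLast]; omega) _ rfl
      · rfl
    · rfl

-- B's inner-run invariant: folding B's step over the run the inner while consumes
theorem pvInner_run (cl : List (List Char)) (j : Nat) (para acc : List (List Char)) (hj : j ≤ cl.length) (hp : para.isEmpty = false) :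
    (cl.drop j).foldl pvBStep2 (acc, para) = (cl.drop (pvAInner cl j para).1).foldl pvBStep2 (acc, (pvAInner cl j para).2)
    ∧ (pvAInner cl j para).2.isEmpty = false
    ∧ j ≤ (pvAInner cl j para).1 ∧ (pvAInner cl j para).1 ≤ cl.length
    ∧ (∀ h : (pvAInner cl j para).1 < cl.length,
        (PySem.Chars.startswith (cl[(pvAInner cl j para).1]'h) ['#']
          || PySem.Chars.startswith (cl[(pvAInner cl j para).1]'h) ['-']
          || (cl[(pvAInner cl j para).1]'h).isEmpty) = true) := by
  induction hn : cl.length - j using Nat.strong_induction_on generalizing j para with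
  | _ n ih =>
    unfold pvAInner
    split
    · next h =>
      split
      · next hcond =>
        have hdrop : cl.drop j = cl[j] :: cl.drop (j + 1) := List.drop_eq_getElem_cons h
        have hb : (PySem.Chars.startswith cl[j] ['#'] || PySem.Chars.startswith cl[j] ['-'] || (cl[j]).isEmpty) = false := by
          revert hcond
          cases (cl[j]).isEmpty <;> cases PySem.Chars.startswith cl[j] ['#'] <;>
            cases PySem.Chars.startswith cl[j] ['-'] <;> simp
        have hstep : pvBStep2 (acc, para) cl[j] = (acc, para ++ [cl[j]]) := by
          unfold pvBStep2; rw [hb]; simp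
        have hrec := ih (cl.length - (j + 1)) (by omega) (j + 1) (para ++ [cl[j]]) (by omega) (by simp) rfl
        refine ⟨?_, hrec.2.1, by omega, hrec.2.2.2.1, hrec.2.2.2.2⟩
        rw [hdrop, List.foldl_cons, hstep]
        exact hrec.1
      · next hcond =>
        refine ⟨rfl, hp, le_refl _, le_of_lt h, fun h' => ?_⟩
        by_cases h1 : (cl[j]).isEmpty = true
        · simp [h1]
        · by_cases h2 : (PySem.Chars.startswith cl[j] ['#'] || PySem.Chars.startswith cl[j] ['-']) = true
          · simp [h2]
          · exfalso
            apply hcond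
            simp only [Bool.not_eq_true] at h1 h2
            simp [h1, h2]
    · next h =>
      exact ⟨rfl, hp, le_refl _, by omega, fun h' => absurd h' (by omega)⟩

theorem pvOuter_eq_fold (cl : List (List Char)) (i : Nat) (acc : List (List Char)) (hi : i ≤ cl.length) :
    pvAOuter cl i acc =
      (fun st => pvBFlush st.1 st.2) ((cl.drop i).foldl pvBStep2 (acc, [])) := by
  induction hn : cl.length - i using Nat.strong_induction_on generalizing i acc with
  | _ n ih =>
    unfold pvAOuter
    split
    · next h =>
      have hdrop : cl.drop i = cl[i] :: cl.drop (i + 1) := List.drop_eq_getElem_cons h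
      split
      · next hb =>
        have hstep : pvBStep2 (acc, []) cl[i] = (acc ++ [cl[i]], []) := by
          unfold pvBStep2; rw [hb]; simp [pvBFlush]
        rw [hdrop]
        simp only [List.foldl_cons, hstep]
        simpa using ih (cl.length - (i + 1)) (by omega) (i + 1) (acc ++ [cl[i]]) (by omega) rfl
      · next hb =>
        have hb' : (PySem.Chars.startswith cl[i] ['#'] || PySem.Chars.startswith cl[i] ['-'] || (cl[i]).isEmpty) = false := by
          simpa using hb
        have hstep : pvBStep2 (acc, []) cl[i] = (acc, [cl[i]]) := by
          unfold pvBStep2; rw [hb']; simp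
        have hrun := pvInner_run cl (i + 1) [cl[i]] acc (by omega) (by simp)
        set r := pvAInner cl (i + 1) [cl[i]] with hr
        rw [hdrop]
        simp only [List.foldl_cons, hstep, hrun.1]
        by_cases hlt : r.1 < cl.length
        · have hdrop2 : cl.drop r.1 = (cl[r.1]'hlt) :: cl.drop (r.1 + 1) := List.drop_eq_getElem_cons hlt
          have hbnd := hrun.2.2.2.2 hlt
          have hstep2 : pvBStep2 (acc, r.2) (cl[r.1]'hlt) =
              (acc ++ [PySem.Chars.join [' '] r.2] ++ [cl[r.1]'hlt], []) := by
            unfold pvBStep2; rw [hbnd]; simp [pvBFlush, hrun.2.1]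
          have hstep3 : pvBStep2 (acc ++ [PySem.Chars.join [' '] r.2], []) (cl[r.1]'hlt) =
              (acc ++ [PySem.Chars.join [' '] r.2] ++ [cl[r.1]'hlt], []) := by
            unfold pvBStep2; rw [hbnd]; simp [pvBFlush]
          rw [ih (cl.length - r.1) (by have := hrun.2.2.1; omega) r.1
                (acc ++ [PySem.Chars.join [' '] r.2]) (le_of_lt hlt) rfl,
              hdrop2]
          simp only [List.foldl_cons, hstep2, hstep3]
        · have hend : r.1 = cl.length := by have := hrun.2.2.2.1; omega
          have hdropnil : cl.drop r.1 = [] := by rw [hend]; simp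
          rw [ih (cl.length - r.1) (by have := hrun.2.2.1; omega) r.1
                (acc ++ [PySem.Chars.join [' '] r.2]) (by omega) rfl,
              hdropnil]
          simp [pvBFlush, hrun.2.1]
    · next h =>
      have : cl.drop i = [] := by
        have : i = cl.length := by omega
        simp [this]
      simp [this, pvBFlush]

theorem pvOuter_eq_fold_zero (cl : List (List Char)) :
    pvAOuter cl 0 [] =
      (fun st => pvBFlush st.1 st.2) (cl.foldl pvBStep2 ([], [])) := by
  simpa using pvOuter_eq_fold cl 0 [] (Nat.zero_le _)

-- ===== VERDICT (by name: the statement is the Claim_ definition above) =====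
theorem clean_markdown_content_spec : Claim_equal_clean_markdown_content := by
  intro content _
  unfold Spec_clean_markdown_content clean_markdown_content clean_markdown_content_alt
  simp only [pvStep1_eq, pvTrim_eq, pvOuter_eq_fold_zero]
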